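-- pv_equiv track=rewrite | github.com/Corina2003/Python_Samson_Corina_3A5 | Lab3/Ex7.py | count_and_max
-- ===== SOURCE A (Python) =====
-- def is_palindrome(number):
--     return str(number) == str(number)[::-1]
--
-- def count_and_max(numbers):
--     palindrome_count = 0
--     max = None
--
--     for number in numbers:
--         if is_palindrome(number):
--             palindrome_count += 1
--             if max is None or number > max:
--                 max = number
--
--     return palindrome_count, max
-- ===== SOURCE B (Python) =====
-- def _reversed_digits(n):
--     r = 0
--     while n > 0:
--         n, d = divmod(n, 10)
--         r = 10 * r + d
--     return r
--
-- def _is_pal(n):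
--     # a non-negative integer reads the same backwards iff its decimal digit reversal equals itself
--     return n >= 0 and _reversed_digits(n) == n
--
-- def count_and_max(numbers):
--     count = sum(1 for n in numbers if _is_pal(n))
--     for n in sorted(numbers, reverse=True):
--         if _is_pal(n):
--             return count, n
--     return count, None
-- ===== Notes on version B (the rewrite author's own statement) =====
-- stated objective: alternative
-- what changed: Palindromicity is tested arithmetically by reversing the decimal digits with divmod instead of comparing str(n) with its reversed string, and the maximum is found by scanning the list sorted in descending order for the first palindrome instead of keeping a running max in a fused loop.
import Mathlib
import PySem

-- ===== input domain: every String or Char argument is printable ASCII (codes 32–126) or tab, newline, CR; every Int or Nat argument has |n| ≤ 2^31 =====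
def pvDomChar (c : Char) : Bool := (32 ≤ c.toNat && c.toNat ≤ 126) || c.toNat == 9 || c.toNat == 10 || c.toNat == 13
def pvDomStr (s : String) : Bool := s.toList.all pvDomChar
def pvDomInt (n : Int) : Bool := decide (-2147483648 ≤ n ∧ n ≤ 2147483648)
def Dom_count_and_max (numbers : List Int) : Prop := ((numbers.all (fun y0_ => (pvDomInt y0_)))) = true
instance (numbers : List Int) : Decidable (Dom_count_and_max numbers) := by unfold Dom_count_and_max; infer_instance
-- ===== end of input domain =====

-- B tests palindromicity by arithmetic digit reversal (divmod) instead of string reversal, and finds the max as the first palindrome of the descending-sorted list instead of a fused running max; alternative algorithm, similar cost.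


-- ===== PORT A =====
-- is_palindrome: str(number)[::-1] is the character-list reverse (exact for a step -1 full slice)
def is_palindrome (number : Int) : Bool :=
  PySem.Int.toChars number == (PySem.Int.toChars number).reverse

def count_and_max (numbers : List Int) : Int × Option Int :=
  numbers.foldl
    (fun (st : Int × Option Int) number =>
      if is_palindrome number then
        (st.1 + 1,
          match st.2 with
          | none => some number
          | some m => if number > m then some number else some m)
      else st)
    (0, none)

-- ===== PORT B =====
-- termination fact for the divmod loop of _reversed_digits (cited in decreasing_by)
theorem pvFloordivTenLt (n : Int) (h : 0 < n) : (PySem.Int.floordiv n 10).toNat < n.toNat := by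
  have h1 : n = ((n.toNat : Nat) : Int) := by omega
  rw [h1, show ((10 : Int)) = ((10 : Nat) : Int) from rfl, PySem.Int.floordiv_natCast]
  simp only [Int.toNat_natCast]
  exact Nat.div_lt_self (by omega) (by norm_num)

-- _reversed_digits: while n > 0: n, d = divmod(n, 10); r = 10 * r + d
def pvRevDigits (n r : Int) : Int :=
  if h : 0 < n then
    pvRevDigits (PySem.Int.floordiv n 10) (10 * r + PySem.Int.mod n 10)
  else r
termination_by n.toNat
decreasing_by exact pvFloordivTenLt n h

-- _is_pal
def pal_alt (n : Int) : Bool := decide (0 ≤ n) && (pvRevDigits n 0 == n)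

def count_and_max_alt (numbers : List Int) : Int × Option Int :=
  let count : Int := ((numbers.filter pal_alt).map (fun _ => (1 : Int))).sum
  match (PySem.List.sorted numbers (fun y => y) true).find? pal_alt with
  | some n => (count, some n)
  | none => (count, none)

-- ===== PRECONDITION & SPEC =====
def Spec_count_and_max (numbers : List Int) (out : Int × Option Int) : Prop := out = count_and_max_alt numbers
instance (numbers : List Int) (out : Int × Option Int) : Decidable (Spec_count_and_max numbers out) := by unfold Spec_count_and_max; infer_instance

-- ===== CLAIM =====
def Claim_equal_count_and_max : Prop := ∀ (numbers : List Int), Dom_count_and_max numbers → Spec_count_and_max numbers (count_and_max numbers)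

-- ===== LEMMAS AND PROOFS =====

-- A's per-element step, abstracted for the loop lemma
def pvStep (st : Int × Option Int) (number : Int) : Int × Option Int :=
  if is_palindrome number then
    (st.1 + 1,
      match st.2 with
      | none => some number
      | some m => if number > m then some number else some m)
  else st

-- A's running-max update restricted to the palindrome list
def pvMaxAcc (m : Option Int) (xs : List Int) : Option Int :=
  xs.foldl (fun m n =>
    match m with
    | none => some n
    | some v => if n > v then some n else some v) m

theorem pvMaxAcc_some (x : Int) (xs : List Int) :
    pvMaxAcc (some x) xs = some (xs.foldl max x) := by
  induction xs generalizing x with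
  | nil => rfl
  | cons h t ih =>
    have hstep : (if h > x then some h else some x) = some (max x h) := by
      split_ifs with hc
      · rw [max_eq_right (le_of_lt hc)]
      · rw [max_eq_left (by omega)]
    show pvMaxAcc (if h > x then some h else some x) t = _
    rw [hstep, ih]
    rfl

theorem pvLoop (xs : List Int) (c : Int) (m : Option Int) :
    xs.foldl pvStep (c, m) =
      (c + ((xs.filter is_palindrome).length : Int),
       pvMaxAcc m (xs.filter is_palindrome)) := by
  induction xs generalizing c m with
  | nil => simp [pvMaxAcc]
  | cons h t ih =>
    by_cases hp : is_palindrome h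
    · show List.foldl pvStep (pvStep (c, m) h) t = _
      simp only [pvStep, hp, if_pos]
      rw [ih]
      refine Prod.ext ?_ ?_
      · simp [hp]; ring
      · simp only [List.filter_cons, hp, if_pos]
        cases m <;> rfl
    · show List.foldl pvStep (pvStep (c, m) h) t = _
      simp only [pvStep, hp, Bool.false_eq_true, if_false]
      rw [ih]
      simp [hp]

theorem pvMaxAcc_none_eq_max? (xs : List Int) :
    pvMaxAcc none xs = PySem.List.max? xs (fun y => y) := by
  cases xs with
  | nil => rfl
  | cons h t =>
    rw [PySem.List.max?_id_cons]
    show pvMaxAcc (some h) t = _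
    rw [pvMaxAcc_some]

-- Nat.toDigits (what PySem.Int.toChars uses) in terms of Nat.digits
theorem pvToDigitsCore_eq (fuel : Nat) : ∀ (n : Nat), 0 < n → n < fuel → ∀ (ds : List Char),
    Nat.toDigitsCore 10 fuel n ds = ((Nat.digits 10 n).map Nat.digitChar).reverse ++ ds := by
  induction fuel with
  | zero => intro n h1 h2; omega
  | succ f ih =>
    intro n h1 h2 ds
    show (if n / 10 = 0 then (n % 10).digitChar :: ds
          else Nat.toDigitsCore 10 f (n / 10) ((n % 10).digitChar :: ds)) = _
    by_cases hz : n / 10 = 0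
    · rw [if_pos hz]
      rw [Nat.digits_def' (by norm_num : (1:Nat) < 10) h1, hz]
      simp
    · rw [if_neg hz]
      rw [ih (n / 10) (Nat.pos_of_ne_zero hz) (by omega)]
      rw [Nat.digits_def' (by norm_num : (1:Nat) < 10) h1]
      simp

-- Nat.toDigits in terms of Nat.digits, for a positive argument
theorem pvToDigits_of_pos (m : Nat) (h : 0 < m) :
    Nat.toDigits 10 m = ((Nat.digits 10 m).map Nat.digitChar).reverse := by
  rw [Nat.toDigits, pvToDigitsCore_eq (m+1) m h (by omega), List.append_nil]

theorem pvToChars_of_pos (n : Int) (h : 0 < n) :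
    PySem.Int.toChars n = ((Nat.digits 10 n.toNat).map Nat.digitChar).reverse := by
  simp only [PySem.Int.toChars]
  rw [if_neg (by omega)]
  exact pvToDigits_of_pos n.toNat (by omega)

theorem pvDigitChar_ne_dash (y : Nat) (h : y < 10) : Nat.digitChar y ≠ '-' := by
  interval_cases y <;> decide

theorem pvMapDigitChar_inj (d e : List Nat) (hd : ∀ x ∈ d, x < 10) (he : ∀ x ∈ e, x < 10)
    (h : d.map Nat.digitChar = e.map Nat.digitChar) : d = e := by
  induction d generalizing e with
  | nil =>
    cases e with
    | nil => rfl
    | cons b t => simp at h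
  | cons a t ih =>
    cases e with
    | nil => simp at h
    | cons b u =>
      simp only [List.map_cons, List.cons.injEq] at h
      have ha := hd a (by simp)
      have hb := he b (by simp)
      have key : ∀ x : Fin 10, ∀ y : Fin 10, Nat.digitChar x.val = Nat.digitChar y.val → x = y := by decide
      have hab : a = b := by
        have := key ⟨a, ha⟩ ⟨b, hb⟩ h.1
        simpa [Fin.ext_iff] using this
      subst hab
      rw [ih u (fun x hx => hd x (List.mem_cons_of_mem _ hx))
            (fun x hx => he x (List.mem_cons_of_mem _ hx)) h.2]

theorem pvIsPal_pos (n : Int) (h : 0 < n) :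
    is_palindrome n = decide (Nat.digits 10 n.toNat = (Nat.digits 10 n.toNat).reverse) := by
  have hlt : ∀ x ∈ Nat.digits 10 n.toNat, x < 10 :=
    fun x hx => Nat.digits_lt_base (by norm_num) hx
  rw [is_palindrome, pvToChars_of_pos n h, List.reverse_reverse]
  apply Bool.eq_iff_iff.mpr
  simp only [beq_iff_eq, decide_eq_true_eq]
  constructor
  · intro hc
    have := pvMapDigitChar_inj (Nat.digits 10 n.toNat).reverse (Nat.digits 10 n.toNat)
      (fun x hx => hlt x (List.mem_reverse.mp hx)) hlt
      (by rw [List.map_reverse]; exact hc)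
    exact this.symm
  · intro hp
    rw [← List.map_reverse, ← hp]

theorem pvRevDigits_eq (m : Nat) (r : Int) :
    pvRevDigits (m : Int) r
      = r * 10 ^ (Nat.digits 10 m).length + ((Nat.ofDigits 10 (Nat.digits 10 m).reverse : Nat) : Int) := by
  induction m using Nat.strong_induction_on generalizing r with
  | _ m ih =>
    rcases Nat.eq_zero_or_pos m with h0 | hpos
    · subst h0
      rw [pvRevDigits]
      simp
    · rw [pvRevDigits, dif_pos (by exact_mod_cast hpos)]
      rw [show ((10 : Int)) = ((10 : Nat) : Int) from rfl, PySem.Int.floordiv_natCast,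
        PySem.Int.mod_natCast]
      rw [ih (m / 10) (Nat.div_lt_self hpos (by norm_num))]
      rw [Nat.digits_def' (by norm_num : (1:Nat) < 10) hpos]
      simp only [List.length_cons, List.reverse_cons, Nat.ofDigits_append, Nat.ofDigits_singleton,
        List.length_reverse]
      push_cast
      ring

theorem pvDigits_cons (m : Nat) (h : 0 < m) :
    Nat.digits 10 m = m % 10 :: Nat.digits 10 (m / 10) :=
  Nat.digits_def' (by norm_num) h

theorem pvPal_agree (n : Int) : pal_alt n = is_palindrome n := by
  rcases lt_trichotomy n 0 with hneg | hzero | hpos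
  · -- both sides are false: a negative number starts with '-', which is not its last character
    have habs : 0 < n.natAbs := by omega
    have hne : Nat.digits 10 n.natAbs ≠ [] := Nat.digits_ne_nil_iff_ne_zero.mpr (by omega)
    have h1 : pal_alt n = false := by
      simp only [pal_alt, Bool.and_eq_false_iff, decide_eq_false_iff_not]
      left; omega
    rw [h1]
    symm
    simp only [is_palindrome, beq_eq_false_iff_ne, ne_eq]
    intro hc
    have hch : PySem.Int.toChars n
        = '-' :: ((Nat.digits 10 n.natAbs).map Nat.digitChar).reverse := by
      simp only [PySem.Int.toChars]
      rw [if_pos (by omega), pvToDigits_of_pos n.natAbs habs]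
    set L := ((Nat.digits 10 n.natAbs).map Nat.digitChar).reverse with hL
    have hLne : L ≠ [] := by simp [hL, hne]
    rw [hch] at hc
    have hc2 : '-' :: L = L.reverse ++ ['-'] := by rw [hc]; simp
    have heq : L.getLast hLne = '-' := by
      have h3 : ('-' :: L).getLast? = some '-' := by rw [hc2]; exact List.getLast?_concat
      rw [List.getLast?_eq_some_getLast (by simp), List.getLast_cons hLne,
        Option.some.injEq] at h3
      exact h3
    have hmem : L.getLast hLne ∈ L := List.getLast_mem hLne
    rw [heq] at hmem
    rw [hL, List.mem_reverse, List.mem_map] at hmem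
    obtain ⟨y, hy, hyc⟩ := hmem
    exact pvDigitChar_ne_dash y (Nat.digits_lt_base (by norm_num) hy) hyc
  · subst hzero
    have h1 : pal_alt 0 = true := by rw [pal_alt, pvRevDigits]; decide
    have h2 : is_palindrome 0 = true := by decide
    rw [h1, h2]
  · -- positive: digit reversal equals the number iff the digit list is a palindrome
    have hm0 : 0 < n.toNat := by omega
    rw [pvIsPal_pos n hpos]
    set d := Nat.digits 10 n.toNat with hd
    have hlt : ∀ x ∈ d, x < 10 := fun x hx => Nat.digits_lt_base (by norm_num) hx
    have h1 : pal_alt n = (pvRevDigits n 0 == n) := by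
      rw [pal_alt, decide_eq_true (by omega : (0:Int) ≤ n), Bool.true_and]
    have hn : n = ((n.toNat : Nat) : Int) := by omega
    have hrev0 : pvRevDigits n 0 = ((Nat.ofDigits 10 d.reverse : Nat) : Int) := by
      conv_lhs => rw [hn]
      rw [pvRevDigits_eq, ← hd]
      ring
    rw [h1, hrev0]
    apply Bool.eq_iff_iff.mpr
    simp only [beq_iff_eq, decide_eq_true_eq]
    constructor
    · intro hof
      have hofn : Nat.ofDigits 10 d.reverse = n.toNat := by omega
      by_cases hz : n.toNat % 10 = 0
      · -- n ends in 0, so it is not a palindrome — and the reversal is strictly smaller than n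
        exfalso
        have hdc : d = 0 :: Nat.digits 10 (n.toNat / 10) := by
          rw [hd, pvDigits_cons _ hm0, hz]
        set e := Nat.digits 10 (n.toNat / 10) with he
        have hrevd : d.reverse = e.reverse ++ [0] := by rw [hdc]; simp
        rw [hrevd, Nat.ofDigits_append, Nat.ofDigits_singleton] at hofn
        simp only [mul_zero, add_zero] at hofn
        have hb : Nat.ofDigits 10 e.reverse < 10 ^ e.length := by
          have hlt2 : ∀ x ∈ e.reverse, x < 8 + 2 := by
            intro x hx
            exact hlt x (by rw [hdc]; exact List.mem_cons_of_mem _ (List.mem_reverse.mp hx))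
          simpa using Nat.ofDigits_lt_base_pow_length' hlt2
        have hge : 10 ^ e.length ≤ n.toNat := by
          have h2 := Nat.base_pow_length_digits_le 10 n.toNat (by norm_num) (by omega)
          rw [← hd, hdc] at h2
          simp only [List.length_cons, pow_succ] at h2
          omega
        omega
      · -- last digit of the reversal is n % 10 ≠ 0, so digit lists are equal by uniqueness
        have hdc : d = n.toNat % 10 :: Nat.digits 10 (n.toNat / 10) := by
          rw [hd]; exact pvDigits_cons _ hm0
        have hgl : ∀ h' : d.reverse ≠ [], d.reverse.getLast h' ≠ 0 := by
          intro h'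
          rw [List.getLast_reverse]
          simp only [hdc, List.head_cons]
          exact hz
        have hdig := Nat.digits_ofDigits 10 (by norm_num) d.reverse
          (fun l hl => hlt l (List.mem_reverse.mp hl)) hgl
        rw [hofn, ← hd] at hdig
        exact hdig
    · intro hp
      rw [← hp, hd, Nat.ofDigits_digits]
      omega

theorem pvFindAux (p : Int → Bool) (ys : List Int) (hsort : ys.Pairwise (fun a b => b ≤ a))
    (v : Int) (hfind : ys.find? p = some v) : ∀ y ∈ ys, p y → y ≤ v := by
  induction ys with
  | nil => simp at hfind
  | cons h t ih =>
    rw [List.pairwise_cons] at hsort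
    by_cases hp : p h
    · rw [List.find?_cons_of_pos hp, Option.some.injEq] at hfind
      subst hfind
      intro y hy _
      rcases List.mem_cons.mp hy with rfl | hyt
      · exact le_refl _
      · exact hsort.1 y hyt
    · rw [List.find?_cons_of_neg hp] at hfind
      intro y hy hpy
      rcases List.mem_cons.mp hy with rfl | hyt
      · exact absurd hpy hp
      · exact ih hsort.2 hfind y hyt hpy

theorem pvFind_desc (p : Int → Bool) (xs : List Int) :
    (PySem.List.sorted xs (fun y => y) true).find? p = PySem.List.max? (xs.filter p) (fun y => y) := by
  have hperm : (PySem.List.sorted xs (fun y => y) true).Perm xs :=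
    PySem.List.sorted_perm xs (fun y => y) true
  have hsort : (PySem.List.sorted xs (fun y => y) true).Pairwise (fun a b => b ≤ a) :=
    PySem.List.sorted_pairwise_rev xs (fun y => y)
  by_cases hall : ∀ x ∈ xs, ¬ p x = true
  · rw [List.find?_eq_none.mpr (fun x hx => hall x (hperm.mem_iff.mp hx))]
    rw [List.filter_eq_nil_iff.mpr hall]
    rfl
  · push Not at hall
    obtain ⟨x, hx, hpx⟩ := hall
    have hfind_ne : (PySem.List.sorted xs (fun y => y) true).find? p ≠ none := by
      intro hc
      exact List.find?_eq_none.mp hc x (hperm.mem_iff.mpr hx) hpx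
    obtain ⟨v, hv⟩ := Option.ne_none_iff_exists'.mp hfind_ne
    have hpv : p v := List.find?_some hv
    have hvmem : v ∈ xs := hperm.mem_iff.mp (List.mem_of_find?_eq_some hv)
    have hvfil : v ∈ xs.filter p := List.mem_filter.mpr ⟨hvmem, hpv⟩
    have hmax_ne : PySem.List.max? (xs.filter p) (fun y => y) ≠ none := by
      intro hc
      rw [PySem.List.max?_eq_none_iff] at hc
      rw [hc] at hvfil
      simp at hvfil
    obtain ⟨m, hm⟩ := Option.ne_none_iff_exists'.mp hmax_ne
    have hmfil : m ∈ xs.filter p := PySem.List.max?_mem hm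
    have hmmem : m ∈ xs := (List.mem_filter.mp hmfil).1
    have hpm : p m := (List.mem_filter.mp hmfil).2
    have h1 : m ≤ v := pvFindAux p _ hsort v hv m (hperm.mem_iff.mpr hmmem) hpm
    have h2 : v ≤ m := PySem.List.max?_isMax hm v hvfil
    rw [hv, hm, le_antisymm h2 h1]

-- ===== VERDICT =====
theorem count_and_max_spec : Claim_equal_count_and_max := by
  intro numbers _
  show count_and_max numbers = count_and_max_alt numbers
  have hfun : pal_alt = is_palindrome := funext pvPal_agree
  unfold count_and_max count_and_max_alt
  have hstep : ∀ st x, (fun (st : Int × Option Int) number =>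
      if is_palindrome number then
        (st.1 + 1,
          match st.2 with
          | none => some number
          | some m => if number > m then some number else some m)
      else st) st x = pvStep st x := fun _ _ => rfl
  simp only [hstep, hfun]
  rw [pvLoop, pvFind_desc, ← pvMaxAcc_none_eq_max?]
  rw [PySem.List.sum_map_const_int]
  cases pvMaxAcc none (numbers.filter is_palindrome) <;> simp
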